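-- pv_equiv track=rewrite | github.com/mohamedsugal/Leetcode-solutions | Solutions1/keepTrucking.py | goodSegment
-- ===== SOURCE A (Python) =====
-- def goodSegment(badNumbers, l, r):
--     # [7, 15, 22, 37, 49, 60]
--     # [3,6]  [8,14]  [16,21]  [23,36]  [38,48]
--     # left = 3
--     # right = 48
--     segments = []
--     segment = None
--     for i in range(l, r+1):
--         if i in badNumbers:
--             if segment is not None:
--                 segments.append(i - segment)
--                 segment = None
--         else:
--             if segment is None:
--                 segment = i
--
--     if segment is not None:
--         segments.append(r - segment+1)
--
--     return segments
-- ===== SOURCE B (Python) =====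
-- def goodSegment(badNumbers, l, r):
--     if r < l:
--         return []
--     s = sorted(badNumbers)
--     # first index with s[i] >= l (hand-written bisect_left; no imports in this module)
--     lo, hi = 0, len(s)
--     while lo < hi:
--         mid = (lo + hi) // 2
--         if s[mid] < l:
--             lo = mid + 1
--         else:
--             hi = mid
--     left = lo
--     # first index with s[i] > r (hand-written bisect_right, starting at left)
--     lo, hi = left, len(s)
--     while lo < hi:
--         mid = (lo + hi) // 2
--         if s[mid] <= r:
--             lo = mid + 1
--         else:
--             hi = mid
--     right = lo
--     segments = []
--     prev = l
--     for b in s[left:right]: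
--         if b > prev:
--             segments.append(b - prev)
--         prev = b + 1
--     if r + 1 > prev:
--         segments.append(r + 1 - prev)
--     return segments
-- ===== Notes on version B (the rewrite author's own statement) =====
-- stated objective: alternative
-- what changed: Instead of walking every integer of [l,r] and testing list membership at each step, B sorts badNumbers once, finds the in-range block with two hand-written binary searches, and emits the positive gaps between consecutive bad numbers of that block (duplicates collapse to zero gaps).
import Mathlib
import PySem

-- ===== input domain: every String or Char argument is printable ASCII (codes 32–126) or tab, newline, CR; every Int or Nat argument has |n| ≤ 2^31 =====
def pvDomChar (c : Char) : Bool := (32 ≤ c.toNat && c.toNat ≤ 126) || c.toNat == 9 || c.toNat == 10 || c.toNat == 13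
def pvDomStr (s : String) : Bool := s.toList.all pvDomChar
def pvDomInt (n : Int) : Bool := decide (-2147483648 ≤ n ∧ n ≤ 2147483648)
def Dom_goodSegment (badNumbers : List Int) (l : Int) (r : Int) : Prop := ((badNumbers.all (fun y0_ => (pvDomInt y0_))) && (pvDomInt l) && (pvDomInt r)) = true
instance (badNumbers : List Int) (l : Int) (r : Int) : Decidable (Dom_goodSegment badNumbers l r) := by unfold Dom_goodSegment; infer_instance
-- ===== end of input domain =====

-- B sorts badNumbers once, locates the in-range block by binary search, and emits the gaps
-- between consecutive bad numbers of that block, instead of A's walk over every integer of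
-- [l,r] with a list-membership test at each step (objective: alternative algorithm).

-- ===== PORT A =====
-- one step of A's for-loop: state = (segments, segment : Option Int)
def pvStepA (badNumbers : List Int) (st : List Int × Option Int) (i : Int) : List Int × Option Int :=
  if i ∈ badNumbers then
    match st.2 with
    | some seg => (st.1 ++ [i - seg], none)
    | none => st
  else
    match st.2 with
    | none => (st.1, some i)
    | some _ => st

def goodSegment (badNumbers : List Int) (l : Int) (r : Int) : List Int :=
  let s := (PySem.List.pyRange l (r + 1) 1).foldl (pvStepA badNumbers) ([], none)
  match s.2 with
  | some seg => s.1 ++ [r - seg + 1]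
  | none => s.1

-- ===== PORT B =====
-- Source B's first while loop: first index in [lo, hi) with s[idx] >= x (s[mid] is in range, so
-- getD is exact); fuel >= hi - lo makes the while loop a structural recursion, nothing else
def pvFindGE (s : List Int) (x : Int) : Nat → Nat → Nat → Nat
  | 0, lo, _hi => lo
  | fuel + 1, lo, hi =>
    if lo < hi then
      if s.getD ((lo + hi) / 2) 0 < x then pvFindGE s x fuel ((lo + hi) / 2 + 1) hi
      else pvFindGE s x fuel lo ((lo + hi) / 2)
    else lo

-- Source B's second while loop: first index in [lo, hi) with s[idx] > x
def pvFindGT (s : List Int) (x : Int) : Nat → Nat → Nat → Nat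
  | 0, lo, _hi => lo
  | fuel + 1, lo, hi =>
    if lo < hi then
      if s.getD ((lo + hi) / 2) 0 ≤ x then pvFindGT s x fuel ((lo + hi) / 2 + 1) hi
      else pvFindGT s x fuel lo ((lo + hi) / 2)
    else lo

-- one step of Source B's for-loop over the in-range block: state = (segments, prev)
def pvStepB (st : List Int × Int) (b : Int) : List Int × Int :=
  ((if st.2 < b then st.1 ++ [b - st.2] else st.1), b + 1)

def goodSegment_alt (badNumbers : List Int) (l : Int) (r : Int) : List Int :=
  if r < l then [] else
  let s := PySem.List.sorted badNumbers (fun x => x) false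
  let left := pvFindGE s l s.length 0 s.length
  let right := pvFindGT s r s.length left s.length
  let bs := PySem.List.slice s (some (left : Int)) (some (right : Int))
  let st := bs.foldl pvStepB ([], l)
  if st.2 < r + 1 then st.1 ++ [r + 1 - st.2] else st.1

-- ===== PRECONDITION & SPEC =====
def Spec_goodSegment (badNumbers : List Int) (l : Int) (r : Int) (out : List Int) : Prop := out = goodSegment_alt badNumbers l r
instance (badNumbers : List Int) (l : Int) (r : Int) (out : List Int) : Decidable (Spec_goodSegment badNumbers l r out) := by unfold Spec_goodSegment; infer_instance

-- ===== CLAIM (what is proved, stated in full; the proofs are below) =====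
def Claim_equal_goodSegment : Prop := ∀ (badNumbers : List Int) (l : Int) (r : Int), Dom_goodSegment badNumbers l r → Spec_goodSegment badNumbers l r (goodSegment badNumbers l r)

-- ===== LEMMAS AND PROOFS =====

-- A's final append, as a function of r and the loop's final state
def pvFinA (r : Int) (s : List Int × Option Int) : List Int :=
  match s.2 with
  | some seg => s.1 ++ [r - seg + 1]
  | none => s.1

-- B's final append
def pvFinB (r : Int) (s : List Int × Int) : List Int :=
  if s.2 < r + 1 then s.1 ++ [r + 1 - s.2] else s.1

theorem pvFindGE_spec (s : List Int) (x : Int) (hpw : s.Pairwise (· ≤ ·)) :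
    ∀ fuel lo hi, hi - lo ≤ fuel → lo ≤ hi → hi ≤ s.length →
      lo ≤ pvFindGE s x fuel lo hi ∧ pvFindGE s x fuel lo hi ≤ hi ∧
      (∀ j, lo ≤ j → j < pvFindGE s x fuel lo hi → s.getD j 0 < x) ∧
      (∀ j, pvFindGE s x fuel lo hi ≤ j → j < hi → x ≤ s.getD j 0) := by
  have hmono : ∀ i j : Nat, i ≤ j → j < s.length → s.getD i 0 ≤ s.getD j 0 := by
    intro i j hij hj
    rcases Nat.eq_or_lt_of_le hij with rfl | hij'
    · exact le_refl _
    · rw [List.getD_eq_getElem s 0 (by omega), List.getD_eq_getElem s 0 hj]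
      exact List.pairwise_iff_getElem.mp hpw i j (by omega) hj hij'
  intro fuel
  induction fuel with
  | zero =>
    intro lo hi h1 h2 h3
    have he : pvFindGE s x 0 lo hi = lo := rfl
    refine ⟨by omega, by omega, ?_, ?_⟩ <;> intro j hj1 hj2 <;> exact absurd hj2 (by omega)
  | succ fuel ih =>
    intro lo hi h1 h2 h3
    by_cases h : lo < hi
    · rw [pvFindGE, if_pos h]
      by_cases hc : s.getD ((lo + hi) / 2) 0 < x
      · rw [if_pos hc]
        obtain ⟨g1, g2, g3, g4⟩ := ih ((lo + hi) / 2 + 1) hi (by omega) (by omega) h3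
        refine ⟨by omega, g2, ?_, g4⟩
        intro j hj1 hj2
        by_cases hjm : j ≤ (lo + hi) / 2
        · exact lt_of_le_of_lt (hmono j ((lo + hi) / 2) hjm (by omega)) hc
        · exact g3 j (by omega) hj2
      · rw [if_neg hc]
        obtain ⟨g1, g2, g3, g4⟩ := ih lo ((lo + hi) / 2) (by omega) (by omega) (by omega)
        refine ⟨g1, by omega, g3, ?_⟩
        intro j hj1 hj2
        by_cases hjm : j < (lo + hi) / 2
        · exact g4 j hj1 hjm
        · exact le_trans (not_lt.mp hc) (hmono ((lo + hi) / 2) j (by omega) (by omega))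
    · rw [pvFindGE, if_neg h]
      exact ⟨le_refl _, by omega, by omega, by omega⟩

theorem pvFindGT_spec (s : List Int) (x : Int) (hpw : s.Pairwise (· ≤ ·)) :
    ∀ fuel lo hi, hi - lo ≤ fuel → lo ≤ hi → hi ≤ s.length →
      lo ≤ pvFindGT s x fuel lo hi ∧ pvFindGT s x fuel lo hi ≤ hi ∧
      (∀ j, lo ≤ j → j < pvFindGT s x fuel lo hi → s.getD j 0 ≤ x) ∧
      (∀ j, pvFindGT s x fuel lo hi ≤ j → j < hi → x < s.getD j 0) := by
  have hmono : ∀ i j : Nat, i ≤ j → j < s.length → s.getD i 0 ≤ s.getD j 0 := by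
    intro i j hij hj
    rcases Nat.eq_or_lt_of_le hij with rfl | hij'
    · exact le_refl _
    · rw [List.getD_eq_getElem s 0 (by omega), List.getD_eq_getElem s 0 hj]
      exact List.pairwise_iff_getElem.mp hpw i j (by omega) hj hij'
  intro fuel
  induction fuel with
  | zero =>
    intro lo hi h1 h2 h3
    have he : pvFindGT s x 0 lo hi = lo := rfl
    refine ⟨by omega, by omega, ?_, ?_⟩ <;> intro j hj1 hj2 <;> exact absurd hj2 (by omega)
  | succ fuel ih =>
    intro lo hi h1 h2 h3
    by_cases h : lo < hi
    · rw [pvFindGT, if_pos h]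
      by_cases hc : s.getD ((lo + hi) / 2) 0 ≤ x
      · rw [if_pos hc]
        obtain ⟨g1, g2, g3, g4⟩ := ih ((lo + hi) / 2 + 1) hi (by omega) (by omega) h3
        refine ⟨by omega, g2, ?_, g4⟩
        intro j hj1 hj2
        by_cases hjm : j ≤ (lo + hi) / 2
        · exact le_trans (hmono j ((lo + hi) / 2) hjm (by omega)) hc
        · exact g3 j (by omega) hj2
      · rw [if_neg hc]
        obtain ⟨g1, g2, g3, g4⟩ := ih lo ((lo + hi) / 2) (by omega) (by omega) (by omega)
        refine ⟨g1, by omega, g3, ?_⟩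
        intro j hj1 hj2
        by_cases hjm : j < (lo + hi) / 2
        · exact g4 j hj1 hjm
        · exact lt_of_lt_of_le (not_le.mp hc) (hmono ((lo + hi) / 2) j (by omega) (by omega))
    · rw [pvFindGT, if_neg h]
      exact ⟨le_refl _, by omega, by omega, by omega⟩

-- B's fold consumes all copies of the minimum l of the block in one conceptual step
theorem pvPeel (l : Int) : ∀ (bs : List Int), bs.Pairwise (· ≤ ·) → (∀ x ∈ bs, l ≤ x) →
    l ∈ bs → ∀ (sg : List Int) (prev : Int), prev ≤ l + 1 →
    ∃ d : List Int, (∀ x ∈ d, l + 1 ≤ x) ∧ d.Pairwise (· ≤ ·) ∧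
      (∀ x, x ∈ d ↔ (x ∈ bs ∧ x ≠ l)) ∧
      bs.foldl pvStepB (sg, prev) =
        d.foldl pvStepB ((if prev < l then sg ++ [l - prev] else sg), l + 1) := by
  intro bs
  induction bs with
  | nil => intro _ _ hl; exact absurd hl (List.not_mem_nil)
  | cons b t ih =>
    intro hpw hge hl sg prev hp
    have hgeb : l ≤ b := hge b List.mem_cons_self
    by_cases hbl : b = l
    · subst hbl
      rw [List.foldl_cons]
      by_cases hlt : b ∈ t
      · obtain ⟨d, hd1, hd2, hd3, hd4⟩ :=
          ih hpw.of_cons (fun x hx => hge x (List.mem_cons_of_mem b hx)) hlt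
            (if prev < b then sg ++ [b - prev] else sg) (b + 1) (by omega)
        refine ⟨d, hd1, hd2, ?_, ?_⟩
        · intro x
          rw [hd3 x, List.mem_cons]
          constructor
          · rintro ⟨hx, hxb⟩; exact ⟨Or.inr hx, hxb⟩
          · rintro ⟨hx | hx, hxb⟩
            · exact absurd hx hxb
            · exact ⟨hx, hxb⟩
        · simp only [pvStepB]
          rw [hd4, if_neg (by omega : ¬ b + 1 < b)]
      · refine ⟨t, ?_, hpw.of_cons, ?_, ?_⟩
        · intro x hx
          have := hge x (List.mem_cons_of_mem b hx)
          have hne : x ≠ b := by rintro rfl; exact hlt hx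
          omega
        · intro x
          rw [List.mem_cons]
          constructor
          · intro hx
            exact ⟨Or.inr hx, by rintro rfl; exact hlt hx⟩
          · rintro ⟨hx | hx, hxb⟩
            · exact absurd hx hxb
            · exact hx
        · simp only [pvStepB]
    · exfalso
      rcases List.mem_cons.mp hl with h | h
      · exact hbl h.symm
      · have : b ≤ l := (List.pairwise_cons.mp hpw).1 l h
        omega
  
-- the main loop correspondence: A's walk over [l, l+n) against B's fold over any sorted
-- list bs that holds exactly the bad numbers of [l, l+n-1] (multiplicity irrelevant)
theorem pvMain (badNumbers : List Int) (n : Nat) :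
    ∀ (l prev : Int) (segs : List Int) (bs : List Int), prev ≤ l →
      bs.Pairwise (· ≤ ·) →
      (∀ x ∈ bs, x ∈ badNumbers ∧ l ≤ x ∧ x ≤ l + n - 1) →
      (∀ x, x ∈ badNumbers → l ≤ x → x ≤ l + n - 1 → x ∈ bs) →
      pvFinA (l + n - 1)
        ((PySem.List.pyRange l (l + n) 1).foldl (pvStepA badNumbers)
          (segs, if prev = l then none else some prev))
      = pvFinB (l + n - 1) (bs.foldl pvStepB (segs, prev)) := by
  induction n with
  | zero =>
    intro l prev segs bs hple hpw hmem hcomp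
    have hbs : bs = [] := by
      cases bs with
      | nil => rfl
      | cons b t =>
        exfalso
        have := hmem b List.mem_cons_self
        push_cast at this
        omega
    subst hbs
    rw [PySem.List.pyRange_one_eq_nil (by omega)]
    simp only [List.foldl_nil]
    by_cases hpl : prev = l
    · subst hpl; rw [if_pos rfl]; simp [pvFinA, pvFinB]
    · rw [if_neg hpl]
      show segs ++ [l + ((0:Nat):Int) - 1 - prev + 1] = pvFinB _ (segs, prev)
      rw [pvFinB, if_pos (by push_cast; omega)]
      congr 2
      push_cast; ring
  | succ n ih =>
    intro l prev segs bs hple hpw hmem hcomp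
    have hcons : PySem.List.pyRange l (l + (n + 1 : Nat)) 1
        = l :: PySem.List.pyRange (l + 1) (l + (n + 1 : Nat)) 1 :=
      PySem.List.pyRange_one_cons (by push_cast; omega)
    have hrange : PySem.List.pyRange (l + 1) (l + (n + 1 : Nat)) 1
        = PySem.List.pyRange (l + 1) ((l + 1) + (n : Nat)) 1 := by
      congr 1; push_cast; ring
    rw [hcons, hrange, List.foldl_cons]
    by_cases hbad : l ∈ badNumbers
    · -- l is bad: B's fold swallows every copy of l, A closes/keeps-empty the segment
      have hlbs : l ∈ bs := hcomp l hbad (le_refl l) (by push_cast; omega)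
      obtain ⟨d, hd1, hd2, hd3, hd4⟩ :=
        pvPeel l bs hpw (fun x hx => (hmem x hx).2.1) hlbs segs prev (by omega)
      rw [hd4]
      have hdm : ∀ x ∈ d, x ∈ badNumbers ∧ l + 1 ≤ x ∧ x ≤ (l + 1) + (n : Int) - 1 := by
        intro x hx
        obtain ⟨hx1, hx2⟩ := (hd3 x).mp hx
        obtain ⟨hb, _, hu⟩ := hmem x hx1
        refine ⟨hb, hd1 x hx, by push_cast at hu ⊢; omega⟩
      have hdc : ∀ x, x ∈ badNumbers → l + 1 ≤ x → x ≤ (l + 1) + (n : Int) - 1 → x ∈ d := by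
        intro x hb h1 h2
        exact (hd3 x).mpr ⟨hcomp x hb (by omega) (by push_cast at h2 ⊢; omega), by omega⟩
      by_cases hpl : prev = l
      · subst hpl
        rw [if_pos rfl, if_neg (lt_irrefl prev)]
        simp only [pvStepA, if_pos hbad]
        have := ih (prev + 1) (prev + 1) segs d (le_refl _) hd2 hdm hdc
        rw [if_pos rfl] at this
        push_cast at this ⊢
        convert this using 3 <;> ring_nf
      · have hplt : prev < l := by omega
        rw [if_neg hpl, if_pos hplt]
        simp only [pvStepA, if_pos hbad]
        have := ih (l + 1) (l + 1) (segs ++ [l - prev]) d (le_refl _) hd2 hdm hdc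
        rw [if_pos rfl] at this
        push_cast at this ⊢
        convert this using 3 <;> ring_nf
    · -- l is good: bs is untouched, A opens (or keeps) the segment
      have hdm : ∀ x ∈ bs, x ∈ badNumbers ∧ l + 1 ≤ x ∧ x ≤ (l + 1) + (n : Int) - 1 := by
        intro x hx
        obtain ⟨hb, hlo, hu⟩ := hmem x hx
        have : x ≠ l := by rintro rfl; exact hbad hb
        refine ⟨hb, by omega, by push_cast at hu ⊢; omega⟩
      have hdc : ∀ x, x ∈ badNumbers → l + 1 ≤ x → x ≤ (l + 1) + (n : Int) - 1 → x ∈ bs := by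
        intro x hb h1 h2
        exact hcomp x hb (by omega) (by push_cast at h2 ⊢; omega)
      by_cases hpl : prev = l
      · subst hpl
        rw [if_pos rfl]
        simp only [pvStepA, if_neg hbad]
        have := ih (prev + 1) prev segs bs (by omega) hpw hdm hdc
        rw [if_neg (by omega : ¬ prev = prev + 1)] at this
        push_cast at this ⊢
        convert this using 3 <;> ring_nf
      · rw [if_neg hpl]
        simp only [pvStepA, if_neg hbad]
        have := ih (l + 1) prev segs bs (by omega) hpw hdm hdc
        rw [if_neg (by omega : ¬ prev = l + 1)] at this
        push_cast at this ⊢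
        convert this using 3 <;> ring_nf

-- membership in B's in-range block, with its witness index in the sorted list
theorem pvMem_block (s : List Int) (a b : Nat) (x : Int) :
    x ∈ (s.drop a).take (b - a) ↔ ∃ j, a ≤ j ∧ j < b ∧ ∃ h : j < s.length, s[j] = x := by
  constructor
  · intro hx
    obtain ⟨k, hk, hkx⟩ := List.getElem_of_mem hx
    have hk' : k < b - a ∧ k < s.length - a := by
      simp only [List.length_take, List.length_drop, Nat.lt_min] at hk
      exact hk
    rw [List.getElem_take, List.getElem_drop] at hkx
    exact ⟨a + k, by omega, by omega, by omega, hkx⟩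
  · rintro ⟨j, hja, hjb, hjl, hjx⟩
    rw [List.mem_iff_getElem]
    refine ⟨j - a, ?_, ?_⟩
    · simp only [List.length_take, List.length_drop, Nat.lt_min]
      omega
    · rw [List.getElem_take, List.getElem_drop]
      have hje : a + (j - a) = j := by omega
      simp only [hje]
      exact hjx

-- ===== VERDICT (by name: the statement is the Claim_ definition above) =====
theorem goodSegment_spec : Claim_equal_goodSegment := by
  intro badNumbers l r _
  unfold Spec_goodSegment
  show goodSegment badNumbers l r = goodSegment_alt badNumbers l r
  by_cases hrl : r < l
  · -- empty interval: A's loop runs zero times, B returns [] at once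
    unfold goodSegment goodSegment_alt
    rw [if_pos hrl, PySem.List.pyRange_one_eq_nil (by omega)]
    rfl
  -- name the pieces of B
  set s := PySem.List.sorted badNumbers (fun x => x) false with hs
  have hpw : s.Pairwise (· ≤ ·) := by
    have := PySem.List.sorted_pairwise (xs := badNumbers) (key := fun x => x)
    simpa [hs] using this
  have hmems : ∀ x, x ∈ s ↔ x ∈ badNumbers := by
    intro x; rw [hs, PySem.List.mem_sorted]
  set left := pvFindGE s l s.length 0 s.length with hleft
  set right := pvFindGT s r s.length left s.length with hright
  obtain ⟨hg1, hg2, hg3, hg4⟩ :=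
    pvFindGE_spec s l hpw s.length 0 s.length (by omega) (Nat.zero_le _) (le_refl _)
  obtain ⟨ht1, ht2, ht3, ht4⟩ :=
    pvFindGT_spec s r hpw s.length left s.length (by omega) (by omega) (le_refl _)
  have hslice : PySem.List.slice s (some (left : Int)) (some (right : Int))
      = (s.drop left).take (right - left) := PySem.List.slice_natCast s left right
  set bs := (s.drop left).take (right - left) with hbs
  -- the three facts pvMain needs about bs
  have hbpw : bs.Pairwise (· ≤ ·) :=
    hpw.sublist ((List.take_sublist _ _).trans (List.drop_sublist _ _))
  have hbmem : ∀ x ∈ bs, x ∈ badNumbers ∧ l ≤ x ∧ x ≤ r := by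
    intro x hx
    obtain ⟨j, hja, hjb, hjl, hjx⟩ := (pvMem_block s left right x).mp hx
    have hmemb : x ∈ badNumbers := (hmems x).mp (hjx ▸ List.getElem_mem hjl)
    have e1 : l ≤ s.getD j 0 := hg4 j hja (by omega)
    have e2 : s.getD j 0 ≤ r := ht3 j hja hjb
    rw [List.getD_eq_getElem s 0 hjl, hjx] at e1 e2
    exact ⟨hmemb, e1, e2⟩
  have hbcomp : ∀ x, x ∈ badNumbers → l ≤ x → x ≤ r → x ∈ bs := by
    intro x hb h1 h2
    obtain ⟨j, hjl, hjx⟩ := List.getElem_of_mem ((hmems x).mpr hb)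
    have hja : left ≤ j := by
      by_contra hlt
      have := hg3 j (Nat.zero_le _) (by omega)
      rw [List.getD_eq_getElem s 0 hjl, hjx] at this
      omega
    have hjb : j < right := by
      by_contra hge
      have := ht4 j (by omega) hjl
      rw [List.getD_eq_getElem s 0 hjl, hjx] at this
      omega
    exact (pvMem_block s left right x).mpr ⟨j, hja, hjb, hjl, hjx⟩
  have h : l ≤ r + 1 := by omega
  obtain ⟨n, hln⟩ : ∃ n : Nat, l + (n : Int) = r + 1 := ⟨(r + 1 - l).toNat, by omega⟩
  have hmain := pvMain badNumbers n l l [] bs (le_refl l) hbpw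
    (by intro x hx; obtain ⟨h1, h2, h3⟩ := hbmem x hx; exact ⟨h1, h2, by omega⟩)
    (by intro x hb h1 h2; exact hbcomp x hb h1 (by omega))
  have hnone : (if l = l then (none : Option Int) else some l) = none := by simp
  rw [hnone, hln, show r + 1 - 1 = r by ring] at hmain
  have hBalt : goodSegment_alt badNumbers l r
      = pvFinB r ((PySem.List.slice s (some (left : Int)) (some (right : Int))).foldl pvStepB ([], l)) := by
    unfold goodSegment_alt
    rw [if_neg hrl]
    rfl
  rw [hBalt, hslice]
  show pvFinA r ((PySem.List.pyRange l (r + 1) 1).foldl (pvStepA badNumbers) ([], none))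
      = pvFinB r (bs.foldl pvStepB ([], l))
  exact hmain
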